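-- pv_equiv track=rewrite | github.com/DVSAWR/Michael_Dawson_Python | Ch.4_Guess_the_word.py | find_all_indx
-- ===== SOURCE A (Python) =====
-- def find_all_indx(txt, char):
--     lst = []
--     l = len(txt)
--     index = 0
--     while index < l:
--         i = txt.find(char, index)
--         if i == -1:
--             return lst
--         lst.append(i)
--         index = i + 1
--     return lst
-- ===== SOURCE B (Python) =====
-- def find_all_indx(txt, char):
--     m = len(char)
--     return [i for i in range(len(txt)) if txt[i:i+m] == char]
-- ===== Notes on version B (the rewrite author's own statement) =====
-- stated objective: simpler
-- what changed: Replaces the str.find-and-advance while loop with a single sliding-window comprehension that compares the slice txt[i:i+len(char)] against char at every index.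
import Mathlib
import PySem

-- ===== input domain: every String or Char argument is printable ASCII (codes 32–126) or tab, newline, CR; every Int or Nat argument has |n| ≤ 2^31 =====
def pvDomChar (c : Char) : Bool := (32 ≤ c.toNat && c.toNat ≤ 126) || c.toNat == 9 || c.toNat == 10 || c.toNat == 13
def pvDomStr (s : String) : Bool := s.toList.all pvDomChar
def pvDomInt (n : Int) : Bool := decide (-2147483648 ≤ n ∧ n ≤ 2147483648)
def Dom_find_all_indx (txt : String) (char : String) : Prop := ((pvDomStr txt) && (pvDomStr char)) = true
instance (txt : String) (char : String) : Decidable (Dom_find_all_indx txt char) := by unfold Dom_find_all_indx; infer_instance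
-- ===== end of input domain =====

-- B replaces A's str.find-and-advance while loop by a single sliding-window pass
-- comparing the slice txt[i:i+len(char)] with char at every index (simpler decomposition, same cost).


-- ===== PORT A =====
-- txt.find(char, index) never returns a value below the start index (needed for termination of the while loop)
theorem findFrom_ge (s c : List Char) (k : Int) (h : PySem.Chars.findFrom s c k ≠ -1) :
    k ≤ PySem.Chars.findFrom s c k := by
  have h1 := PySem.Chars.neg_one_le_find
    (List.drop (0 : Int).toNat (List.take ((s.length : Int)).toNat s)) c
  have h2 := PySem.Chars.neg_one_le_find
    (List.drop (k + (s.length : Int)).toNat (List.take ((s.length : Int)).toNat s)) c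
  have h3 := PySem.Chars.neg_one_le_find
    (List.drop k.toNat (List.take ((s.length : Int)).toNat s)) c
  unfold PySem.Chars.findFrom at h ⊢
  dsimp only at h ⊢
  split_ifs at h ⊢ <;> omega

-- the while loop of A: state (index, lst)
def findAllLoop (txt char : String) (l : Int) (index : Int) (lst : List Int) : List Int :=
  if _h : index < l then
    let i := PySem.Str.findFrom txt char index
    if i = -1 then lst
    else findAllLoop txt char l (i + 1) (lst ++ [i])
  else lst
termination_by (l - index).toNat
decreasing_by
  have := findFrom_ge txt.toList char.toList index (by simpa [PySem.Str.findFrom_eq] using ‹¬ _ = -1›)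
  simp only [PySem.Str.findFrom_eq] at *
  omega

def find_all_indx (txt : String) (char : String) : List Int :=
  findAllLoop txt char (PySem.Str.len txt) 0 []

-- ===== PORT B =====
def find_all_indx_alt (txt : String) (char : String) : List Int :=
  let m := PySem.Str.len char
  (PySem.List.pyRange 0 (PySem.Str.len txt) 1).filter
    (fun i => PySem.Str.slice txt (some i) (some (i + m)) == char)

-- ===== PRECONDITION & SPEC =====
def Spec_find_all_indx (txt : String) (char : String) (out : List Int) : Prop := out = find_all_indx_alt txt char
instance (txt : String) (char : String) (out : List Int) : Decidable (Spec_find_all_indx txt char out) := by unfold Spec_find_all_indx; infer_instance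

-- ===== CLAIM (what is proved, stated in full; the proofs are below) =====
def Claim_equal_find_all_indx : Prop := ∀ (txt : String) (char : String), Dom_find_all_indx txt char → Spec_find_all_indx txt char (find_all_indx txt char)

-- ===== LEMMAS AND PROOFS =====

-- B's slice test at a non-negative index j is exactly "char is a prefix of txt.toList.drop j"
theorem slice_test_iff (txt char : String) (j : Int) (hj : 0 ≤ j) :
    ((PySem.Str.slice txt (some j) (some (j + PySem.Str.len char)) == char) = true)
      ↔ char.toList <+: txt.toList.drop j.toNat := by
  have hm : PySem.Str.len char = (char.toList.length : Int) := PySem.Str.len_eq char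
  rw [beq_iff_eq, ← String.toList_inj]
  have h2 : (PySem.Str.slice txt (some j) (some (j + PySem.Str.len char))).toList
      = List.take char.toList.length (List.drop j.toNat txt.toList) := by
    show (String.ofList (PySem.Chars.slice txt.toList _ _)).toList = _
    rw [String.toList_ofList]
    show PySem.List.slice _ _ _ = _
    rw [PySem.List.slice_toNat _ hj (by omega)]
    congr 1
    omega
  rw [h2]
  constructor
  · intro h; rw [← h]; exact List.take_prefix _ _
  · intro h; exact (List.prefix_iff_eq_take.mp h).symm

-- main invariant of A's while loop, stated with the explicit length bound
theorem loop_eq (txt char : String) : ∀ (fuel : Nat) (k : Nat), txt.toList.length - k ≤ fuel →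
    k ≤ txt.toList.length → ∀ (lst : List Int),
    findAllLoop txt char (txt.toList.length : Int) (k : Int) lst
      = lst ++ (PySem.List.pyRange (k : Int) (txt.toList.length : Int) 1).filter
          (fun i => PySem.Str.slice txt (some i) (some (i + PySem.Str.len char)) == char) := by
  intro fuel
  induction fuel with
  | zero =>
    intro k hfuel hk lst
    have hk' : k = txt.toList.length := by omega
    rw [findAllLoop]
    simp [hk', PySem.List.pyRange_one_eq_nil (le_refl _)]
  | succ n ih =>
    intro k hfuel hk lst
    by_cases hkl : (k : Int) < (txt.toList.length : Int)
    · rw [findAllLoop]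
      rw [dif_pos hkl]
      set i := PySem.Str.findFrom txt char (k : Int) with hi
      have hic : i = PySem.Chars.findFrom txt.toList char.toList (k : Int) := by
        rw [hi, PySem.Str.findFrom_eq]
      by_cases h1 : i = -1
      · -- no occurrence at or after k: the filter over [k, l) is empty
        have hnone : ¬ char.toList <:+: txt.toList.drop k :=
          (PySem.Chars.findFrom_natCast_eq_neg_one_iff txt.toList char.toList k hk).mp
            (by rw [← hic]; exact h1)
        have hfilter : (PySem.List.pyRange (k : Int) (txt.toList.length : Int) 1).filter
            (fun i => PySem.Str.slice txt (some i) (some (i + PySem.Str.len char)) == char) = [] := by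
          rw [List.filter_eq_nil_iff]
          intro a ha
          have hmem := PySem.List.mem_pyRange_one.mp ha
          intro hpred
          have hpre := (slice_test_iff txt char a (by omega)).mp hpred
          apply hnone
          rw [← PySem.Chars.isIn_iff_infix, ← PySem.Chars.exists_prefix_drop_iff_isIn]
          refine ⟨a.toNat - k, ?_⟩
          rw [List.drop_drop]
          have heq : k + (a.toNat - k) = a.toNat := by omega
          rwa [heq]
        rw [if_pos h1, hfilter, List.append_nil]
      · -- first occurrence at i: k ≤ i, char prefix at i, nothing in [k, i)
        have hspec := PySem.Chars.findFrom_natCast_spec txt.toList char.toList k hk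
          (by rw [← hic]; exact h1)
        rw [← hic] at hspec
        obtain ⟨hki, hpre, hmin⟩ := hspec
        have hile : i.toNat < txt.toList.length := by
          by_cases hc : char.toList = []
          · -- empty pattern: minimality forces i = k < length
            by_contra hge
            have hlt : k < i.toNat := by omega
            exact hmin k (le_refl _) hlt (by simp [hc])
          · have hne : txt.toList.drop i.toNat ≠ [] := by
              intro hd; rw [hd] at hpre; exact hc (List.prefix_nil.mp hpre)
            have := List.drop_eq_nil_iff.not.mp (by simpa using hne)
            omega
        have hicast : (i.toNat : Int) = i := by omega
        have hil : i < (txt.toList.length : Int) := by omega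
        -- split the range at i and i+1
        have hsplit : PySem.List.pyRange (k : Int) (txt.toList.length : Int) 1
            = PySem.List.pyRange (k : Int) i 1
              ++ (i :: PySem.List.pyRange (i + 1) (txt.toList.length : Int) 1) := by
          rw [PySem.List.pyRange_one_append (k : Int) i (txt.toList.length : Int) hki (by omega),
            PySem.List.pyRange_one_cons hil]
        have hfalse : (PySem.List.pyRange (k : Int) i 1).filter
            (fun j => PySem.Str.slice txt (some j) (some (j + PySem.Str.len char)) == char) = [] := by
          rw [List.filter_eq_nil_iff]
          intro a ha hpred
          have hmem := PySem.List.mem_pyRange_one.mp ha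
          have hpre' := (slice_test_iff txt char a (by omega)).mp hpred
          exact hmin a.toNat (by omega) (by omega) hpre'
        have htrue : (PySem.Str.slice txt (some i) (some (i + PySem.Str.len char)) == char) = true :=
          (slice_test_iff txt char i (by omega)).mpr hpre
        have hrec := ih (i.toNat + 1) (by omega) (by omega) (lst ++ [i])
        rw [if_neg h1, hsplit, List.filter_append, List.filter_cons, htrue, if_pos rfl, hfalse]
        push_cast [hicast] at hrec
        rw [hrec, List.nil_append, List.append_assoc]
        rfl
    · rw [findAllLoop]
      rw [dif_neg hkl, PySem.List.pyRange_one_eq_nil (by omega), List.filter_nil, List.append_nil]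

-- ===== VERDICT (by name: the statement is the Claim_ definition above) =====
theorem find_all_indx_spec : Claim_equal_find_all_indx := by
  intro txt char _
  unfold Spec_find_all_indx find_all_indx find_all_indx_alt
  rw [PySem.Str.len_eq txt]
  have h := loop_eq txt char txt.toList.length 0 (by omega) (by omega) []
  simpa using h
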